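-- pv_equiv track=rewrite | github.com/Cho-El/Python-coding-test-practice | 프로그래머스 문제/파이썬/2022 쿠키런서버개발자인턴/2.py | not_weekend_hol
-- ===== SOURCE A (Python) =====
-- from bisect import bisect_left
-- from bisect import bisect_right
--
-- def check_leap_year(year):
--     if year % 400 == 0:
--         return 1
--     if year % 4 == 0 and year % 100 != 0:
--         return 1
--     return 0
--
-- def cal_days(start_day, end_day):
--
--     year = [[365,31,28,31,30,31,30,31,31,30,31,30,31],[366,31,29,31,30,31,30,31,31,30,31,30,31]]
--     days = 0
--
--     start_year, start_month, start_days = start_day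
--     end_year, end_month, end_days = end_day
--
--
--     if start_year == end_year:# 근무 년도와 퇴직 연도가 같을 때
--         month_temp = year[check_leap_year(start_year)]
--         if start_month == end_month: # 달이 같은 경우
--             days += end_days - start_days + 1
--             return days
--
--         days += month_temp[start_month] - start_days + 1
--         for m in range(start_month + 1, end_month):
--             days += month_temp[m]
--         days += end_days
--
--     else:# 근무 년도와 퇴직 연도가 다를 때
--         # 근무 시작 해 계산
--         month_temp = year[check_leap_year(start_year)]
--         days += month_temp[start_month] - start_days + 1
--         for m in range(start_month + 1, 13):
--             days += month_temp[m]
--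
--         # 중간 해 계산
--         for y in range(start_year + 1, end_year):
--             days += year[check_leap_year(y)][0]
--
--         # 근무 마지막 해 계산
--         month_temp = year[check_leap_year(end_year)]
--         for m in range(1, end_month):
--             days += month_temp[m]
--         days += end_days
--
--     return days
--
-- def not_weekend_hol(holidays, start_day, end_day, date):
--     holidays.sort()
--     result = 0
--     s_idx = bisect_left(holidays, start_day)
--     e_idx = bisect_right(holidays, end_day)
--
--     holidays = holidays[s_idx:e_idx]
--
--     for h in holidays:
--         days = cal_days(start_day, h)
--         if date[(days - 1) % 7] == 'SAT' or date[(days - 1) % 7] == 'SUN':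
--             continue
--         else:
--             result += 1
--
--     return result
-- ===== SOURCE B (Python) =====
-- def not_weekend_hol(holidays, start_day, end_day, date):
--     # same in-place sort side effect as the original; range test + closed-form ordinal replace bisect + cal_days
--     holidays.sort()
--     CUM = [0, 0, 31, 59, 90, 120, 151, 181, 212, 243, 273, 304, 334]
--
--     def is_leap(y):
--         return y % 400 == 0 or (y % 4 == 0 and y % 100 != 0)
--
--     def ordinal(day):
--         y, m, d = day
--         return (365 * y + (y - 1) // 4 - (y - 1) // 100 + (y - 1) // 400
--                 + CUM[m] + (1 if m > 2 and is_leap(y) else 0) + d)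
--
--     count = 0
--     for h in holidays:
--         if start_day <= h <= end_day:
--             wd = (ordinal(h) - ordinal(start_day)) % 7
--             if date[wd] not in ('SAT', 'SUN'):
--                 count += 1
--     return count
-- ===== Notes on version B (the rewrite author's own statement) =====
-- stated objective: alternative
-- what changed: A sorts, bisects out a slice, and for each holiday in range runs cal_days, a loop over every month and year between start_day and the holiday; B instead tests each holiday with a direct lexicographic range comparison and computes the weekday from a closed-form date-to-ordinal formula (365*y + leap-count via floor divisions + cumulative month table + day), with no bisect, no slice and no per-holiday loop.
-- outside the precondition, e.g. on not_weekend_hol([(2022, 3, 1)], (2022, 3, 1), (2022, 3, 31), ['MON']): A returns 1, B returns 1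
import Mathlib
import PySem

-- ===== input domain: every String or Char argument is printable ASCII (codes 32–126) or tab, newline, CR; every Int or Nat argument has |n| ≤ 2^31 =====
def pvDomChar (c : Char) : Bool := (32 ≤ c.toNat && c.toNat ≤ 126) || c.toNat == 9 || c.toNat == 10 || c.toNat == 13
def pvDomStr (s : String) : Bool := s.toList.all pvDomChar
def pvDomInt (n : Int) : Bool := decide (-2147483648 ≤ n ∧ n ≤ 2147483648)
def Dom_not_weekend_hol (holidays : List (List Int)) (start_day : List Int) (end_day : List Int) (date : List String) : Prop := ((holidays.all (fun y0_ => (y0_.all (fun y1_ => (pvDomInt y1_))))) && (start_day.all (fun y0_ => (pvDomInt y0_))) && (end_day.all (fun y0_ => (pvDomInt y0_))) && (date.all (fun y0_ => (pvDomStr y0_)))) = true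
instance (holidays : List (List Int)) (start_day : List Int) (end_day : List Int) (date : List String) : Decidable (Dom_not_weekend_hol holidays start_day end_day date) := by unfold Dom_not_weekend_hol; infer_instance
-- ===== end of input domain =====

-- B replaces A's bisect-and-slice plus per-holiday month/year summation (cal_days) by a direct
-- lexicographic range test and a closed-form date ordinal — an alternative algorithm.
-- Both A and B sort `holidays` in place (same observable mutation); equivalence is about the return value.

-- ===== PORT A =====
def pvLeapA (y : Int) : Int :=
  if PySem.Int.mod y 400 == 0 then 1
  else if PySem.Int.mod y 4 == 0 && !(PySem.Int.mod y 100 == 0) then 1 else 0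

def pvYearTable : List (List Int) :=
  [[365,31,28,31,30,31,30,31,31,30,31,30,31],[366,31,29,31,30,31,30,31,31,30,31,30,31]]

def pvCalDays (start_day : List Int) (end_day : List Int) : Int :=
  let start_year := PySem.List.pyGetD start_day 0 0
  let start_month := PySem.List.pyGetD start_day 1 0
  let start_days := PySem.List.pyGetD start_day 2 0
  let end_year := PySem.List.pyGetD end_day 0 0
  let end_month := PySem.List.pyGetD end_day 1 0
  let end_days := PySem.List.pyGetD end_day 2 0
  if start_year == end_year then
    let month_temp := PySem.List.pyGetD pvYearTable (pvLeapA start_year) []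
    if start_month == end_month then
      end_days - start_days + 1
    else
      let days := PySem.List.pyGetD month_temp start_month 0 - start_days + 1
      let days := (PySem.List.pyRange (start_month+1) end_month 1).foldl
        (fun acc m => acc + PySem.List.pyGetD month_temp m 0) days
      days + end_days
  else
    let month_temp := PySem.List.pyGetD pvYearTable (pvLeapA start_year) []
    let days := PySem.List.pyGetD month_temp start_month 0 - start_days + 1
    let days := (PySem.List.pyRange (start_month+1) 13 1).foldl
      (fun acc m => acc + PySem.List.pyGetD month_temp m 0) days
    let days := (PySem.List.pyRange (start_year+1) end_year 1).foldl
      (fun acc y => acc + PySem.List.pyGetD (PySem.List.pyGetD pvYearTable (pvLeapA y) []) 0 0) days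
    let month_temp2 := PySem.List.pyGetD pvYearTable (pvLeapA end_year) []
    let days := (PySem.List.pyRange 1 end_month 1).foldl
      (fun acc m => acc + PySem.List.pyGetD month_temp2 m 0) days
    days + end_days

def not_weekend_hol (holidays : List (List Int)) (start_day : List Int) (end_day : List Int) (date : List String) : Int :=
  let hs := PySem.List.sorted holidays (fun x => x) false
  let s_idx := PySem.List.bisectLeft hs start_day
  let e_idx := PySem.List.bisectRight hs end_day
  let hs2 := PySem.List.slice hs (some ((s_idx : Nat) : Int)) (some ((e_idx : Nat) : Int))
  hs2.foldl (fun result h =>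
    let days := pvCalDays start_day h
    let w := PySem.List.pyGetD date (PySem.Int.mod (days - 1) 7) ""
    if w == "SAT" || w == "SUN" then result else result + 1) 0

-- ===== PORT B =====
def pvCum : List Int := [0,0,31,59,90,120,151,181,212,243,273,304,334]

def pvIsLeap (y : Int) : Bool :=
  PySem.Int.mod y 400 == 0 || (PySem.Int.mod y 4 == 0 && !(PySem.Int.mod y 100 == 0))

def pvOrdinal (day : List Int) : Int :=
  let y := PySem.List.pyGetD day 0 0
  let m := PySem.List.pyGetD day 1 0
  let d := PySem.List.pyGetD day 2 0
  365*y + PySem.Int.floordiv (y-1) 4 - PySem.Int.floordiv (y-1) 100 + PySem.Int.floordiv (y-1) 400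
    + PySem.List.pyGetD pvCum m 0 + (if 2 < m ∧ pvIsLeap y then 1 else 0) + d

def not_weekend_hol_alt (holidays : List (List Int)) (start_day : List Int) (end_day : List Int) (date : List String) : Int :=
  let hs := PySem.List.sorted holidays (fun x => x) false
  hs.foldl (fun count h =>
    if start_day ≤ h ∧ h ≤ end_day then
      let w := PySem.List.pyGetD date (PySem.Int.mod (pvOrdinal h - pvOrdinal start_day) 7) ""
      if w == "SAT" || w == "SUN" then count else count + 1
    else count) 0

-- ===== PRECONDITION & SPEC =====
-- Pre_ restricts to inputs whose dates that actually get processed (the holidays lexicographically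
-- between start_day and end_day, plus start_day itself when there is such a holiday) are well-formed
-- [year, month, day] triples with month in 1..12, and requires a 7-entry weekday table when some
-- holiday is processed: outside this natural domain Python A either raises (IndexError/ValueError)
-- or returns a meaningless value produced by negative-index wraparound into the month table.
def Pre_not_weekend_hol (holidays : List (List Int)) (start_day : List Int) (end_day : List Int) (date : List String) : Prop :=
  (∀ h ∈ holidays, start_day ≤ h ∧ h ≤ end_day →
      h.length = 3 ∧ 1 ≤ h.getD 1 0 ∧ h.getD 1 0 ≤ 12) ∧
  ((∃ h ∈ holidays, start_day ≤ h ∧ h ≤ end_day) →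
      start_day.length = 3 ∧ 1 ≤ start_day.getD 1 0 ∧ start_day.getD 1 0 ≤ 12 ∧ 7 ≤ date.length)

instance (holidays : List (List Int)) (start_day : List Int) (end_day : List Int) (date : List String) : Decidable (Pre_not_weekend_hol holidays start_day end_day date) := by unfold Pre_not_weekend_hol; infer_instance

def pvWitness_not_weekend_hol : List (List Int) × List Int × List Int × List String :=
  ([[2022, 1, 3], [2022, 5, 5]], [2022, 1, 1], [2022, 12, 31],
   ["SAT", "SUN", "MON", "TUE", "WED", "THU", "FRI"])

def Spec_not_weekend_hol (holidays : List (List Int)) (start_day : List Int) (end_day : List Int) (date : List String) (out : Int) : Prop := out = not_weekend_hol_alt holidays start_day end_day date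
instance (holidays : List (List Int)) (start_day : List Int) (end_day : List Int) (date : List String) (out : Int) : Decidable (Spec_not_weekend_hol holidays start_day end_day date out) := by unfold Spec_not_weekend_hol; infer_instance

-- ===== CLAIM (what is proved, stated in full; the proofs are below) =====
def Claim_equal_not_weekend_hol : Prop := ∀ (holidays : List (List Int)) (start_day : List Int) (end_day : List Int) (date : List String), Dom_not_weekend_hol holidays start_day end_day date → Pre_not_weekend_hol holidays start_day end_day date → Spec_not_weekend_hol holidays start_day end_day date (not_weekend_hol holidays start_day end_day date)

-- ===== LEMMAS AND PROOFS =====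

-- monotone access into a ≤-sorted list
lemma pvMono (xs : List (List Int)) (hsort : xs.Pairwise (· ≤ ·))
    (i j : Nat) (hij : i ≤ j) (hj : j < xs.length) :
    xs[i]'(lt_of_le_of_lt hij hj) ≤ xs[j] := by
  rcases Nat.eq_or_lt_of_le hij with rfl | hlt
  · exact le_refl _
  · exact List.pairwise_iff_getElem.1 hsort i j (lt_of_le_of_lt hij hj) hj hlt

lemma pvBisectLeftLoop_spec (xs : List (List Int)) (x : List Int)
    (fuel : Nat) : ∀ (lo hi : Nat), xs.Pairwise (· ≤ ·) →
    hi ≤ xs.length → lo ≤ hi → hi - lo ≤ fuel →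
    (∀ j (hj : j < xs.length), j < lo → xs[j] < x) →
    (∀ j (hj : j < xs.length), hi ≤ j → x ≤ xs[j]) →
    PySem.List.bisectLeftLoop xs x fuel lo hi ≤ xs.length ∧
    (∀ j (hj : j < xs.length), j < PySem.List.bisectLeftLoop xs x fuel lo hi → xs[j] < x) ∧
    (∀ j (hj : j < xs.length), PySem.List.bisectLeftLoop xs x fuel lo hi ≤ j → x ≤ xs[j]) := by
  induction fuel with
  | zero =>
    intro lo hi hsort hhi hlohi hfuel hbefore hafter
    have : lo = hi := by omega
    subst this
    simp only [PySem.List.bisectLeftLoop]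
    exact ⟨hhi, hbefore, fun j hj hle => hafter j hj hle⟩
  | succ fuel ih =>
    intro lo hi hsort hhi hlohi hfuel hbefore hafter
    rw [PySem.List.bisectLeftLoop]
    by_cases hlt : lo < hi
    · rw [if_pos hlt]
      have hmidlt : (lo + hi) / 2 < xs.length := by omega
      rw [List.getElem?_eq_getElem hmidlt]
      dsimp only
      by_cases hy : xs[(lo + hi) / 2] < x
      · rw [if_pos hy]
        refine ih ((lo + hi) / 2 + 1) hi hsort hhi (by omega) (by omega) ?_ hafter
        intro j hj hjlt
        calc xs[j] ≤ xs[(lo + hi) / 2]'hmidlt := pvMono xs hsort j _ (by omega) hmidlt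
          _ < x := hy
      · rw [if_neg hy]
        refine ih lo ((lo + hi) / 2) hsort (by omega) (by omega) (by omega) hbefore ?_
        intro j hj hjge
        calc x ≤ xs[(lo + hi) / 2]'hmidlt := not_lt.1 hy
          _ ≤ xs[j] := pvMono xs hsort _ j hjge hj
    · rw [if_neg hlt]
      have : lo = hi := by omega
      exact ⟨by omega, hbefore, fun j hj hle => hafter j hj (by omega)⟩

lemma pvBisectRightLoop_spec (xs : List (List Int)) (x : List Int)
    (fuel : Nat) : ∀ (lo hi : Nat), xs.Pairwise (· ≤ ·) →
    hi ≤ xs.length → lo ≤ hi → hi - lo ≤ fuel →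
    (∀ j (hj : j < xs.length), j < lo → xs[j] ≤ x) →
    (∀ j (hj : j < xs.length), hi ≤ j → x < xs[j]) →
    PySem.List.bisectRightLoop xs x fuel lo hi ≤ xs.length ∧
    (∀ j (hj : j < xs.length), j < PySem.List.bisectRightLoop xs x fuel lo hi → xs[j] ≤ x) ∧
    (∀ j (hj : j < xs.length), PySem.List.bisectRightLoop xs x fuel lo hi ≤ j → x < xs[j]) := by
  induction fuel with
  | zero =>
    intro lo hi hsort hhi hlohi hfuel hbefore hafter
    have : lo = hi := by omega
    subst this
    simp only [PySem.List.bisectRightLoop]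
    exact ⟨hhi, hbefore, fun j hj hle => hafter j hj hle⟩
  | succ fuel ih =>
    intro lo hi hsort hhi hlohi hfuel hbefore hafter
    rw [PySem.List.bisectRightLoop]
    by_cases hlt : lo < hi
    · rw [if_pos hlt]
      have hmidlt : (lo + hi) / 2 < xs.length := by omega
      rw [List.getElem?_eq_getElem hmidlt]
      dsimp only
      by_cases hy : x < xs[(lo + hi) / 2]
      · rw [if_pos hy]
        refine ih lo ((lo + hi) / 2) hsort (by omega) (by omega) (by omega) hbefore ?_
        intro j hj hjge
        calc x < xs[(lo + hi) / 2]'hmidlt := hy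
          _ ≤ xs[j] := pvMono xs hsort _ j hjge hj
      · rw [if_neg hy]
        refine ih ((lo + hi) / 2 + 1) hi hsort hhi (by omega) (by omega) ?_ hafter
        intro j hj hjlt
        calc xs[j] ≤ xs[(lo + hi) / 2]'hmidlt := pvMono xs hsort j _ (by omega) hmidlt
          _ ≤ x := not_lt.1 hy
    · rw [if_neg hlt]
      have : lo = hi := by omega
      exact ⟨by omega, hbefore, fun j hj hle => hafter j hj (by omega)⟩

-- counting over the bisect slice of a sorted list = counting with the range test
lemma pvCountSlice (hs : List (List Int)) (s e : List Int) (p : List Int → Bool)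
    (hsort : hs.Pairwise (· ≤ ·)) :
    List.countP p (PySem.List.slice hs (some ((PySem.List.bisectLeft hs s : Nat) : Int))
        (some ((PySem.List.bisectRight hs e : Nat) : Int)))
      = List.countP (fun h => decide (s ≤ h ∧ h ≤ e) && p h) hs := by
  obtain ⟨hL1, hLlt, hLge⟩ := pvBisectLeftLoop_spec hs s hs.length 0 hs.length hsort
    (le_refl _) (Nat.zero_le _) (by omega) (fun j hj h => by omega) (fun j hj h => by omega)
  obtain ⟨hR1, hRle, hRgt⟩ := pvBisectRightLoop_spec hs e hs.length 0 hs.length hsort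
    (le_refl _) (Nat.zero_le _) (by omega) (fun j hj h => by omega) (fun j hj h => by omega)
  have hLdef : PySem.List.bisectLeft hs s = PySem.List.bisectLeftLoop hs s hs.length 0 hs.length := rfl
  have hRdef : PySem.List.bisectRight hs e = PySem.List.bisectRightLoop hs e hs.length 0 hs.length := rfl
  set L := PySem.List.bisectLeftLoop hs s hs.length 0 hs.length with hLset
  set R := PySem.List.bisectRightLoop hs e hs.length 0 hs.length with hRset
  rw [hLdef, hRdef, PySem.List.slice_natCast]
  by_cases hLR : R ≤ L
  · have hz : R - L = 0 := by omega
    rw [hz]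
    simp only [List.take_zero, List.countP_nil]
    symm
    apply List.countP_eq_zero.2
    intro h hmem
    obtain ⟨j, hj, rfl⟩ := List.mem_iff_getElem.1 hmem
    by_cases hjR : j < R
    · have : hs[j] < s := hLlt j hj (by omega)
      simp only [Bool.and_eq_true, decide_eq_true_eq]
      rintro ⟨⟨h1, _⟩, _⟩
      exact absurd this (not_lt.2 h1)
    · have : e < hs[j] := hRgt j hj (by omega)
      simp only [Bool.and_eq_true, decide_eq_true_eq]
      rintro ⟨⟨_, h2⟩, _⟩
      exact absurd this (not_lt.2 h2)
  · have hLR' : L ≤ R := by omega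
    have hmid : (hs.drop L).drop (R - L) = hs.drop R := by
      rw [List.drop_drop]
      congr 1
      omega
    have hdecomp : hs = hs.take L ++ ((hs.drop L).take (R - L) ++ hs.drop R) := by
      rw [← hmid, List.take_append_drop, List.take_append_drop]
    have hq1 : List.countP (fun h => decide (s ≤ h ∧ h ≤ e) && p h) (hs.take L) = 0 := by
      apply List.countP_eq_zero.2
      intro h hmem
      obtain ⟨j, hj, rfl⟩ := List.mem_iff_getElem.1 hmem
      have hjlen : j < hs.length := by simp at hj; omega
      rw [List.getElem_take]
      have : hs[j] < s := hLlt j hjlen (by simp at hj; omega)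
      simp only [Bool.and_eq_true, decide_eq_true_eq]
      rintro ⟨⟨h1, _⟩, _⟩
      exact absurd this (not_lt.2 h1)
    have hq3 : List.countP (fun h => decide (s ≤ h ∧ h ≤ e) && p h) (hs.drop R) = 0 := by
      apply List.countP_eq_zero.2
      intro h hmem
      obtain ⟨j, hj, rfl⟩ := List.mem_iff_getElem.1 hmem
      have hjlen : R + j < hs.length := by simp at hj; omega
      rw [List.getElem_drop]
      have : e < hs[R + j] := hRgt (R + j) hjlen (by omega)
      simp only [Bool.and_eq_true, decide_eq_true_eq]
      rintro ⟨⟨_, h2⟩, _⟩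
      exact absurd this (not_lt.2 h2)
    have hq2 : List.countP (fun h => decide (s ≤ h ∧ h ≤ e) && p h) ((hs.drop L).take (R - L))
        = List.countP p ((hs.drop L).take (R - L)) := by
      apply List.countP_congr
      intro h hmem
      obtain ⟨j, hj, rfl⟩ := List.mem_iff_getElem.1 hmem
      have hjlen : j < (hs.drop L).length := by simp at hj ⊢; omega
      have hjR : j < R - L := by simp at hj; omega
      rw [List.getElem_take, List.getElem_drop]
      have hLj : L + j < hs.length := by simp at hjlen; omega
      have hge : s ≤ hs[L + j] := hLge (L + j) hLj (by omega)
      have hle : hs[L + j] ≤ e := hRle (L + j) hLj (by omega)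
      simp [hge, hle]
    conv_rhs => rw [hdecomp]
    rw [List.countP_append, List.countP_append, hq1, hq3, hq2]
    omega

-- a 0/1-counting foldl with an inverted test is a countP
lemma pvFoldlCount {α : Type} (c : α → Bool) (l : List α) (init : Int) :
    l.foldl (fun r h => if c h then r else r + 1) init = init + List.countP (fun h => !c h) l := by
  have := PySem.List.foldl_congr_mem l (fun r h => if c h then r else r + 1)
    (fun r h => if (!c h) then r + 1 else r) init (by intro acc x _; by_cases hcx : c x = true <;> simp [hcx])
  rw [this, PySem.List.foldl_count_if]

-- month-length cumulative tables (index m = days before month m, 1 ≤ m ≤ 13)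
def pvCcList (lp : Bool) : List Int :=
  if lp then [0,0,31,60,91,121,152,182,213,244,274,305,335,366]
  else [0,0,31,59,90,120,151,181,212,243,273,304,334,365]

def pvCc (lp : Bool) (m : Int) : Int := PySem.List.pyGetD (pvCcList lp) m 0

def pvMt (lp : Bool) : List Int :=
  if lp then [366,31,29,31,30,31,30,31,31,30,31,30,31]
  else [365,31,28,31,30,31,30,31,31,30,31,30,31]

def pvLL (n : Int) : Int :=
  PySem.Int.floordiv n 4 - PySem.Int.floordiv n 100 + PySem.Int.floordiv n 400

lemma pvLeapA_eq (y : Int) : pvLeapA y = if pvIsLeap y then 1 else 0 := by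
  unfold pvLeapA pvIsLeap
  cases h400 : (PySem.Int.mod y 400 == 0) <;> cases h4 : (PySem.Int.mod y 4 == 0) <;>
    cases h100 : (PySem.Int.mod y 100 == 0) <;> simp

lemma pvMonthTable_eq (y : Int) :
    PySem.List.pyGetD pvYearTable (pvLeapA y) [] = pvMt (pvIsLeap y) := by
  rw [pvLeapA_eq]; cases pvIsLeap y <;> rfl

lemma pvMtStep (lp : Bool) (m : Int) (h1 : 1 ≤ m) (h2 : m ≤ 12) :
    PySem.List.pyGetD (pvMt lp) m 0 = pvCc lp (m+1) - pvCc lp m := by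
  interval_cases m <;> cases lp <;> decide

lemma pvCcCum (lp : Bool) (m : Int) (h1 : 1 ≤ m) (h2 : m ≤ 12) :
    pvCc lp m = PySem.List.pyGetD pvCum m 0 + (if 2 < m ∧ lp then 1 else 0) := by
  interval_cases m <;> cases lp <;> decide

lemma pvLLStep (y : Int) : pvLL y - pvLL (y-1) = if pvIsLeap y then 1 else 0 := by
  unfold pvLL pvIsLeap
  simp only [PySem.Int.floordiv_eq_ediv_of_pos (by norm_num : (0:Int) < 4),
    PySem.Int.floordiv_eq_ediv_of_pos (by norm_num : (0:Int) < 100),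
    PySem.Int.floordiv_eq_ediv_of_pos (by norm_num : (0:Int) < 400),
    PySem.Int.mod_eq_emod_of_pos (by norm_num : (0:Int) < 4),
    PySem.Int.mod_eq_emod_of_pos (by norm_num : (0:Int) < 100),
    PySem.Int.mod_eq_emod_of_pos (by norm_num : (0:Int) < 400),
    Bool.or_eq_true, Bool.and_eq_true, beq_iff_eq, Bool.not_eq_true', beq_eq_false_iff_ne]
  split_ifs with h
  · omega
  · rw [not_or, not_and_or] at h
    omega

lemma pvSumMonths (lp : Bool) (a b acc : Int) (ha : 1 ≤ a) (hb : b ≤ 13) (hab : a ≤ b) :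
    (PySem.List.pyRange a b 1).foldl (fun acc m => acc + PySem.List.pyGetD (pvMt lp) m 0) acc
      = acc + pvCc lp b - pvCc lp a := by
  have key : ∀ (n : Nat) (b : Int), b ≤ 13 → a ≤ b → (b - a).toNat = n → ∀ acc : Int,
      (PySem.List.pyRange a b 1).foldl (fun acc m => acc + PySem.List.pyGetD (pvMt lp) m 0) acc
        = acc + pvCc lp b - pvCc lp a := by
    intro n
    induction n with
    | zero =>
      intro b hb hab hn acc
      have hba : b = a := by omega
      subst hba
      rw [PySem.List.pyRange_one_eq_nil (le_refl b)]
      simp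
    | succ n ih =>
      intro b hb hab hn acc
      have hab' : a ≤ b - 1 := by omega
      have hsplit : PySem.List.pyRange a b 1 = PySem.List.pyRange a (b-1) 1 ++ [b-1] := by
        have h := PySem.List.pyRange_one_succ_right hab'
        have : b - 1 + 1 = b := by ring
        rwa [this] at h
      rw [hsplit, List.foldl_append, ih (b-1) (by omega) hab' (by omega) acc]
      simp only [List.foldl]
      rw [pvMtStep lp (b-1) (by omega) (by omega)]
      have : b - 1 + 1 = b := by ring
      rw [this]
      ring
  exact key (b - a).toNat b hb hab rfl acc

lemma pvSumYears (a b acc : Int) (hab : a ≤ b) :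
    (PySem.List.pyRange a b 1).foldl (fun acc y => acc + (if pvIsLeap y then 366 else 365)) acc
      = acc + 365*(b-a) + pvLL (b-1) - pvLL (a-1) := by
  have key : ∀ (n : Nat) (b : Int), a ≤ b → (b - a).toNat = n → ∀ acc : Int,
      (PySem.List.pyRange a b 1).foldl (fun acc y => acc + (if pvIsLeap y then 366 else 365)) acc
        = acc + 365*(b-a) + pvLL (b-1) - pvLL (a-1) := by
    intro n
    induction n with
    | zero =>
      intro b hab hn acc
      have hba : b = a := by omega
      subst hba
      rw [PySem.List.pyRange_one_eq_nil (le_refl b)]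
      simp
    | succ n ih =>
      intro b hab hn acc
      have hab' : a ≤ b - 1 := by omega
      have hsplit : PySem.List.pyRange a b 1 = PySem.List.pyRange a (b-1) 1 ++ [b-1] := by
        have h := PySem.List.pyRange_one_succ_right hab'
        have : b - 1 + 1 = b := by ring
        rwa [this] at h
      rw [hsplit, List.foldl_append, ih (b-1) hab' (by omega) acc]
      simp only [List.foldl]
      have hstep := pvLLStep (b-1)
      have hone : b - 1 - 1 = b - 2 := by ring
      rw [hone] at hstep
      rw [hone]
      rcases hL : pvIsLeap (b-1) <;> rw [hL] at hstep <;> norm_num at hstep ⊢ <;> linarith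
  exact key (b - a).toNat b hab rfl acc

-- ordinal characterisation for a well-formed triple
lemma pvOrdinal_eq (y m d : Int) (h1 : 1 ≤ m) (h2 : m ≤ 12) :
    pvOrdinal [y, m, d] = 365*y + pvLL (y-1) + pvCc (pvIsLeap y) m + d := by
  unfold pvOrdinal pvLL
  rw [pvCcCum (pvIsLeap y) m h1 h2]
  simp only [PySem.List.pyGetD_ofNat']
  norm_num
  ring

-- decode the lexicographic comparison of two [y,m,d] triples
lemma pvLen3 (l : List Int) (h : l.length = 3) : ∃ a b c, l = [a, b, c] := by
  rcases l with _ | ⟨a, l⟩; · simp at h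
  rcases l with _ | ⟨b, l⟩; · simp at h
  rcases l with _ | ⟨c, l⟩; · simp at h
  rcases l with _ | ⟨x, l⟩; · exact ⟨a, b, c, rfl⟩
  simp at h

lemma pvLexLe (a b c d e f : Int) (h : ([a,b,c] : List Int) ≤ [d,e,f]) :
    a < d ∨ (a = d ∧ (b < e ∨ (b = e ∧ c ≤ f))) := by
  rw [← not_lt, List.cons_lt_cons_iff] at h
  by_cases h1 : d < a
  · exact absurd (Or.inl h1) h
  · rcases lt_or_eq_of_le (not_lt.1 h1) with h2 | h2
    · exact Or.inl h2
    · subst h2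
      refine Or.inr ⟨rfl, ?_⟩
      have h' : ¬ ([e,f] : List Int) < [b,c] := fun hh => h (Or.inr ⟨rfl, hh⟩)
      rw [List.cons_lt_cons_iff] at h'
      by_cases h3 : e < b
      · exact absurd (Or.inl h3) h'
      · rcases lt_or_eq_of_le (not_lt.1 h3) with h4 | h4
        · exact Or.inl h4
        · subst h4
          refine Or.inr ⟨rfl, ?_⟩
          have h'' : ¬ ([f] : List Int) < [c] := fun hh => h' (Or.inr ⟨rfl, hh⟩)
          rw [List.cons_lt_cons_iff] at h''
          simp at h''
          omega

-- the heart: cal_days via the closed-form ordinal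
lemma pvCalDays_eq (s h : List Int) (hs3 : s.length = 3) (hh3 : h.length = 3)
    (hsm : 1 ≤ s.getD 1 0) (hsm' : s.getD 1 0 ≤ 12)
    (hhm : 1 ≤ h.getD 1 0) (hhm' : h.getD 1 0 ≤ 12)
    (hle : s ≤ h) :
    pvCalDays s h = pvOrdinal h - pvOrdinal s + 1 := by
  obtain ⟨sy, sm, sd, rfl⟩ := pvLen3 s hs3
  obtain ⟨ey, em, ed, rfl⟩ := pvLen3 h hh3
  simp only [List.getD] at hsm hsm' hhm hhm'
  simp only [List.getElem?_cons_succ, List.getElem?_cons_zero, Option.getD_some] at hsm hsm' hhm hhm'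
  have hlex := pvLexLe sy sm sd ey em ed hle
  rw [pvOrdinal_eq sy sm sd hsm hsm', pvOrdinal_eq ey em ed hhm hhm']
  unfold pvCalDays
  simp only [PySem.List.pyGetD_ofNat', pvMonthTable_eq, List.getD, List.getElem?_cons_zero,
    List.getElem?_cons_succ, Option.getD_some]
  by_cases hyy : sy = ey
  · subst hyy
    rw [if_pos (by simp)]
    by_cases hmm : sm = em
    · subst hmm
      rw [if_pos (by simp)]
      ring
    · have hsmem : sm < em := by rcases hlex with h | ⟨_, h | ⟨h, _⟩⟩ <;> omega
      rw [if_neg (by simpa using hmm)]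
      rw [pvSumMonths (pvIsLeap sy) (sm+1) em _ (by omega) (by omega) (by omega)]
      rw [pvMtStep (pvIsLeap sy) sm (by omega) (by omega)]
      ring
  · have hyy' : sy < ey := by rcases hlex with h | ⟨h, _⟩ <;> omega
    rw [if_neg (by simpa using hyy)]
    rw [pvSumMonths (pvIsLeap sy) (sm+1) 13 _ (by omega) (by omega) (by omega)]
    rw [pvMtStep (pvIsLeap sy) sm (by omega) (by omega)]
    have hyfold : ∀ (acc : Int),
        (PySem.List.pyRange (sy+1) ey 1).foldl
          (fun acc y => acc + ((pvMt (pvIsLeap y))[0]?).getD 0) acc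
        = (PySem.List.pyRange (sy+1) ey 1).foldl
          (fun acc y => acc + (if pvIsLeap y then 366 else 365)) acc := by
      intro acc
      refine PySem.List.foldl_congr_mem _ _ _ _ ?_
      intro a y _
      cases pvIsLeap y <;> rfl
    rw [hyfold, pvSumYears (sy+1) ey _ (by omega)]
    rw [pvSumMonths (pvIsLeap ey) 1 em _ (by omega) (by omega) (by omega)]
    have hcc13 : pvCc (pvIsLeap sy) 13 = 365 + (pvLL sy - pvLL (sy-1)) := by
      have hst := pvLLStep sy
      cases hL : pvIsLeap sy <;> rw [hL] at hst <;> norm_num at hst <;> rw [hst] <;> decide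
    have hcc1 : pvCc (pvIsLeap ey) 1 = 0 := by
      cases hE : pvIsLeap ey <;> decide
    rw [hcc13, hcc1]
    have hsimp : sy + 1 - 1 = sy := by ring
    rw [hsimp]
    ring

-- the weekday tests of the two programs
def pvTestA (s : List Int) (date : List String) (h : List Int) : Bool :=
  PySem.List.pyGetD date (PySem.Int.mod (pvCalDays s h - 1) 7) "" == "SAT"
    || PySem.List.pyGetD date (PySem.Int.mod (pvCalDays s h - 1) 7) "" == "SUN"

def pvTestB (s : List Int) (date : List String) (h : List Int) : Bool :=
  PySem.List.pyGetD date (PySem.Int.mod (pvOrdinal h - pvOrdinal s) 7) "" == "SAT"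
    || PySem.List.pyGetD date (PySem.Int.mod (pvOrdinal h - pvOrdinal s) 7) "" == "SUN"

-- ===== VERDICT (by name: the statement is the Claim_ definition above) =====
theorem not_weekend_hol_spec : Claim_equal_not_weekend_hol := by
  intro holidays s e date _ hpre
  obtain ⟨hall, hex⟩ := hpre
  have hsort : (PySem.List.sorted holidays (fun x => x) false).Pairwise (· ≤ ·) := by
    have h0 := PySem.List.sorted_pairwise (κ := List Int) holidays (fun x => x)
    have heq : (PySem.List.sorted holidays (fun x => x) false)
        = (@PySem.List.sorted (List Int) (List Int) List.instLinearOrder.toLT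
            LinearOrder.toDecidableLT holidays (fun x => x) false) := by
      congr 1
    rw [heq]
    exact h0
  set hs := PySem.List.sorted holidays (fun x => x) false with hhs
  have e1 : not_weekend_hol holidays s e date
      = List.foldl (fun r h => if pvTestA s date h then r else r + 1) 0
          (PySem.List.slice hs (some ((PySem.List.bisectLeft hs s : Nat) : Int))
            (some ((PySem.List.bisectRight hs e : Nat) : Int))) := rfl
  have e2 : not_weekend_hol_alt holidays s e date
      = List.foldl (fun c h => if s ≤ h ∧ h ≤ e then (if pvTestB s date h then c else c + 1) else c)
          0 hs := rfl
  have e3 : not_weekend_hol_alt holidays s e date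
      = List.foldl (fun c h => if (decide (s ≤ h ∧ h ≤ e) && !pvTestB s date h) then c + 1 else c) 0 hs := by
    rw [e2]
    refine PySem.List.foldl_congr_mem _ _ _ _ ?_
    intro acc h _
    by_cases hin : s ≤ h ∧ h ≤ e
    · rw [if_pos hin]
      by_cases ht : pvTestB s date h = true <;> simp [hin, ht]
    · rw [if_neg hin]
      simp [hin]
  unfold Spec_not_weekend_hol
  rw [e1, pvFoldlCount, e3, PySem.List.foldl_count_if]
  rw [pvCountSlice hs s e (fun h => !pvTestA s date h) hsort]
  congr 1
  refine congrArg _ (List.countP_congr ?_)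
  intro h hmem
  have hmem' : h ∈ holidays := (PySem.List.mem_sorted holidays (fun x => x) false h).1 hmem
  by_cases hin : s ≤ h ∧ h ≤ e
  · obtain ⟨hh3, hhm, hhm'⟩ := hall h hmem' hin
    obtain ⟨hs3, hsm, hsm', _⟩ := hex ⟨h, hmem', hin⟩
    have hdays : pvCalDays s h - 1 = pvOrdinal h - pvOrdinal s := by
      rw [pvCalDays_eq s h hs3 hh3 hsm hsm' hhm hhm' hin.1]
      ring
    have htests : pvTestA s date h = pvTestB s date h := by
      unfold pvTestA pvTestB
      rw [hdays]
    rw [htests]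
  · simp [hin]
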